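-- pv_equiv track=rewrite | github.com/AbstractEndeavors/ReadWriteContracts | guiNetAndAsk.py | isAnyInt
-- ===== SOURCE A (Python) =====
-- def isInt(k):
--     if type(k) is int:
--         return True
--     return False
--
-- def isAnyInt(k):
--     if isInt(k):
--         return True
--     if isStr(k) == False:
--         k = str(k)
--     spl = k.split('.')
--     if isLs(spl) == True:
--         if len(spl) == 2:
--             for i in range(0,len(spl)):
--                 if ifAllInts(spl[i]) == False:
--                     return False
--             return True
--     if ifAllInts(spl) == False:
--         return False
--     return True
--
-- def isLs(ls):
--     if type(ls) is list:
--         return True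
--     return False
--
-- def isStr(x):
--     if type(x) is str:
--         return True
--     return False
--
-- def ifAllInts(x):
--     lsN,ints = [],getAllInts()
--     if isStr(x) == False:
--         x = str(x)
--     for i in range(0,len(x)):
--         if x[i] not in ints:
--             return False
--     return True
--
-- def getAllInts():
--     return str('0,1,2,3,4,5,6,7,8,9').split(',')
-- ===== SOURCE B (Python) =====
-- def isAnyInt(k):
--     # Single-pass scan with a seen-dot flag instead of split + helper chain;
--     # true iff exactly one '.' and every other char is an ASCII digit.
--     if type(k) is int:
--         return True
--     s = k if type(k) is str else str(k)
--     seen = False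
--     for c in s:
--         if c == '.':
--             if seen:
--                 return False
--             seen = True
--         elif c not in '0123456789':
--             return False
--     return seen
-- ===== Notes on version B (the rewrite author's own statement) =====
-- stated objective: simpler
-- what changed: Replaces the split-on-dot plus helper chain (isLs/ifAllInts/getAllInts with a rebuilt digit list) by a single left-to-right scan carrying a seen-dot flag: true iff exactly one dot and all other characters are ASCII digits.
import Mathlib
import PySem

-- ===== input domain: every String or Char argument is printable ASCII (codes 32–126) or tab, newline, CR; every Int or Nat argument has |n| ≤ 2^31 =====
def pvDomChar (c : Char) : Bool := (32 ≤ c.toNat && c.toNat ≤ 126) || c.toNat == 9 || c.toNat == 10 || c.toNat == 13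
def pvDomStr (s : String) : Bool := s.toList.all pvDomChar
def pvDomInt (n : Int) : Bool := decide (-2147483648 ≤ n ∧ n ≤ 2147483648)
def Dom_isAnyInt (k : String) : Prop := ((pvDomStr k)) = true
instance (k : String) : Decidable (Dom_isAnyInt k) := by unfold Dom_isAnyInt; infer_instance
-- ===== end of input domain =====

-- B replaces A's split-on-dot + helper chain by one left-to-right scan with a seen-dot flag (simpler, same result).

-- ===== PORT A =====
-- getAllInts(): str('0,1,2,3,4,5,6,7,8,9').split(',')
def pvGetAllInts : List String := (PySem.Str.split? "0,1,2,3,4,5,6,7,8,9" ",").getD []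

-- ifAllInts(x) for a str x: the index loop with early 'return False' is the List.all over x's chars;
-- 'x[i] not in ints' compares the 1-char string against the list of digit strings
def pvIfAllInts (x : String) : Bool := x.toList.all (fun c => decide (String.ofList [c] ∈ pvGetAllInts))

-- str() of a list of str, as Python prints it (repr of each element, ', '-joined, in brackets);
-- exact on the printable-ASCII + tab/newline/CR domain (those are the only chars repr escapes there)
def pvReprChars (q : Char) (cs : List Char) : List Char :=
  cs.flatMap (fun c =>
    if c = '\\' then ['\\', '\\']
    else if c = '\t' then ['\\', 't']
    else if c = '\n' then ['\\', 'n']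
    else if c = '\r' then ['\\', 'r']
    else if c = q then ['\\', q]
    else [c])

def pvReprStr (s : String) : List Char :=
  if '\'' ∈ s.toList ∧ '"' ∉ s.toList then '"' :: pvReprChars '"' s.toList ++ ['"']
  else '\'' :: pvReprChars '\'' s.toList ++ ['\'']

def pvStrOfStrList (l : List String) : String :=
  String.ofList ('[' :: PySem.Chars.join [',', ' '] (l.map pvReprStr) ++ [']'])

-- isAnyInt(k) for a str k: isInt(k) is False and isStr(k) is True, so those branches are inert;
-- isLs(spl) is always True for a split result. The len==2 block returns on every path it is entered.
def isAnyInt (k : String) : Bool :=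
  let spl := (PySem.Str.split? k ".").getD []
  if spl.length = 2 then
    (PySem.List.pyRange 0 (spl.length : Int) 1).all (fun i => pvIfAllInts (PySem.List.pyGetD spl i ""))
  else
    -- falls through to 'if ifAllInts(spl) == False: return False / return True' with the LIST spl,
    -- which ifAllInts turns into str(spl)
    pvIfAllInts (pvStrOfStrList spl)

-- ===== PORT B =====
def pvDigits : List Char := "0123456789".toList

-- the for-loop of Source B: seen-dot flag, early False on a second dot or a non-digit
def pvScan : List Char → Bool → Bool
  | [], seen => seen
  | c :: rest, seen =>
    if c = '.' then (if seen then false else pvScan rest true)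
    else if c ∈ pvDigits then pvScan rest seen  -- 'c not in "0123456789"' on a 1-char c = list membership
    else false

def isAnyInt_alt (k : String) : Bool := pvScan k.toList false

-- ===== PRECONDITION & SPEC =====
def Spec_isAnyInt (k : String) (out : Bool) : Prop := out = isAnyInt_alt k
instance (k : String) (out : Bool) : Decidable (Spec_isAnyInt k out) := by unfold Spec_isAnyInt; infer_instance

-- ===== CLAIM (what is proved, stated in full; the proofs are below) =====
def Claim_equal_isAnyInt : Prop := ∀ (k : String), Dom_isAnyInt k → Spec_isAnyInt k (isAnyInt k)

-- ===== LEMMAS AND PROOFS =====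

-- A reference split-on-'.' used only by the proofs
def pvPrepend (p : List Char) : List (List Char) → List (List Char)
  | [] => [p]
  | h :: t => (p ++ h) :: t

def pvSplitDot : List Char → List (List Char)
  | [] => [[]]
  | c :: rest => if c = '.' then [] :: pvSplitDot rest else pvPrepend [c] (pvSplitDot rest)

lemma pvPrepend_ne_nil (p l) : pvPrepend p l ≠ [] := by cases l <;> simp [pvPrepend]

lemma pvSplitDot_ne_nil (cs : List Char) : pvSplitDot cs ≠ [] := by
  cases cs with
  | nil => simp [pvSplitDot]
  | cons c rest => simp only [pvSplitDot]; split <;> simp [pvPrepend_ne_nil]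

lemma pvPrepend_nil (l : List (List Char)) (h : l ≠ []) : pvPrepend [] l = l := by
  cases l with | nil => simp at h | cons a t => simp [pvPrepend]

lemma pvPrepend_prepend (p q l) : pvPrepend p (pvPrepend q l) = pvPrepend (p ++ q) l := by
  cases l <;> simp [pvPrepend]

lemma go_eq (cs : List Char) : ∀ (fuel : Nat) (cur : List Char) (acc : List (List Char)),
    cs.length < fuel →
    PySem.Chars.splitOn.go ['.'] fuel cs cur acc = acc.reverse ++ pvPrepend cur.reverse (pvSplitDot cs) := by
  induction cs with
  | nil =>
    intro fuel cur acc h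
    obtain ⟨f, rfl⟩ := Nat.exists_eq_succ_of_ne_zero (by omega : fuel ≠ 0)
    simp [PySem.Chars.splitOn.go, pvSplitDot, pvPrepend]
  | cons c rest ih =>
    intro fuel cur acc h
    obtain ⟨f, rfl⟩ := Nat.exists_eq_succ_of_ne_zero (by omega : fuel ≠ 0)
    by_cases hc : c = '.'
    · subst hc
      rw [show PySem.Chars.splitOn.go ['.'] (f+1) ('.' :: rest) cur acc
            = PySem.Chars.splitOn.go ['.'] f rest [] (cur.reverse :: acc) from by
          simp [PySem.Chars.splitOn.go, List.isPrefixOf]]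
      rw [ih f [] (cur.reverse :: acc) (by simpa using h)]
      rw [show ([] : List Char).reverse = [] from rfl, pvPrepend_nil _ (pvSplitDot_ne_nil rest)]
      simp [pvSplitDot, pvPrepend]
    · rw [show PySem.Chars.splitOn.go ['.'] (f+1) (c :: rest) cur acc
            = PySem.Chars.splitOn.go ['.'] f rest (c :: cur) acc from by
          simp only [PySem.Chars.splitOn.go, List.isPrefixOf]
          simp [Ne.symm hc]]
      rw [ih f (c :: cur) acc (by simpa using h)]
      simp [pvSplitDot, hc, pvPrepend_prepend]

lemma splitOn_dot (cs : List Char) : PySem.Chars.splitOn cs ['.'] = pvSplitDot cs := by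
  rw [PySem.Chars.splitOn, go_eq cs (cs.length + 1) [] [] (by omega)]
  simp [pvPrepend_nil _ (pvSplitDot_ne_nil cs)]

lemma split_eq (k : String) :
    (PySem.Str.split? k ".").getD [] = (pvSplitDot k.toList).map String.ofList := by
  simp [PySem.Str.split?, PySem.Chars.split?, splitOn_dot]

lemma length_prepend (p l) : (pvPrepend p l).length = max l.length 1 := by
  cases l <;> simp [pvPrepend]

lemma length_splitDot (cs : List Char) : (pvSplitDot cs).length = cs.count '.' + 1 := by
  induction cs with
  | nil => simp [pvSplitDot]
  | cons c rest ih =>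
    by_cases hc : c = '.'
    · simp [pvSplitDot, hc, ih]
    · rw [show pvSplitDot (c :: rest) = pvPrepend [c] (pvSplitDot rest) from by simp [pvSplitDot, hc]]
      rw [length_prepend, ih, Nat.max_eq_left (by omega)]
      simp [hc]

lemma mem_ints (c : Char) :
    decide (String.ofList [c] ∈ pvGetAllInts) = decide (c ∈ pvDigits) := by
  have h1 : pvGetAllInts = ["0","1","2","3","4","5","6","7","8","9"] := by decide
  have h2 : pvDigits = ['0','1','2','3','4','5','6','7','8','9'] := by decide
  have key : ∀ d : Char, (String.ofList [c] = String.ofList [d]) ↔ c = d := by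
    intro d
    constructor
    · intro h; have := congrArg String.toList h; simpa using this
    · rintro rfl; rfl
  rw [h1, h2]
  simp only [List.mem_cons, List.not_mem_nil, or_false]
  simp only [show ("0" : String) = String.ofList ['0'] from rfl,
    show ("1" : String) = String.ofList ['1'] from rfl,
    show ("2" : String) = String.ofList ['2'] from rfl,
    show ("3" : String) = String.ofList ['3'] from rfl,
    show ("4" : String) = String.ofList ['4'] from rfl,
    show ("5" : String) = String.ofList ['5'] from rfl,
    show ("6" : String) = String.ofList ['6'] from rfl,
    show ("7" : String) = String.ofList ['7'] from rfl,
    show ("8" : String) = String.ofList ['8'] from rfl,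
    show ("9" : String) = String.ofList ['9'] from rfl, key]

lemma ifAllInts_eq (s : String) :
    pvIfAllInts s = s.toList.all (fun c => decide (c ∈ pvDigits)) := by
  simp [pvIfAllInts, mem_ints]

lemma all_prepend (p l) (f : List Char → Bool) (hf : ∀ a b, f (a ++ b) = (f a && f b)) :
    (pvPrepend p l).all f = (f p && l.all f) := by
  cases l <;> simp [pvPrepend, hf, Bool.and_assoc]

lemma all_splitDot (cs : List Char) :
    (pvSplitDot cs).all (fun p => p.all (fun c => decide (c ∈ pvDigits)))
      = cs.all (fun c => c == '.' || decide (c ∈ pvDigits)) := by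
  induction cs with
  | nil => simp [pvSplitDot]
  | cons c rest ih =>
    by_cases hc : c = '.'
    · simp [pvSplitDot, hc, ih]
    · rw [show pvSplitDot (c :: rest) = pvPrepend [c] (pvSplitDot rest) from by simp [pvSplitDot, hc]]
      rw [all_prepend _ _ _ (by intro a b; simp)]
      have hb : (c == '.') = false := beq_eq_false_iff_ne.mpr hc
      simp [ih, hb]

lemma scan_eq (cs : List Char) : ∀ b : Bool,
    pvScan cs b = (decide (cs.count '.' + (cond b 1 0) = 1)
                    && cs.all (fun c => c == '.' || decide (c ∈ pvDigits))) := by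
  induction cs with
  | nil => intro b; cases b <;> simp [pvScan]
  | cons c rest ih =>
    intro b
    by_cases hc : c = '.'
    · subst hc
      cases b with
      | false => simp [pvScan, ih true]
      | true =>
        rw [show pvScan ('.' :: rest) true = false from rfl]
        simp
    · by_cases hd : c ∈ pvDigits
      · rw [show pvScan (c :: rest) b = pvScan rest b from by simp [pvScan, hc, hd]]
        simp [ih b, hc, hd]
      · rw [show pvScan (c :: rest) b = false from by simp [pvScan, hc, hd]]
        simp [hc, hd]

lemma bracket_not_digit : decide ('[' ∈ pvDigits) = false := by decide

-- ===== VERDICT (by name: the statement is the Claim_ definition above) =====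
theorem isAnyInt_spec : Claim_equal_isAnyInt := by
  intro k _
  unfold Spec_isAnyInt
  show isAnyInt k = isAnyInt_alt k
  rw [isAnyInt, isAnyInt_alt, split_eq]
  by_cases h2 : ((pvSplitDot k.toList).map String.ofList).length = 2
  · -- exactly one dot
    have hlen : (pvSplitDot k.toList).length = 2 := by simpa using h2
    obtain ⟨a, b, hab⟩ := List.length_eq_two.mp hlen
    have hcount : k.toList.count '.' = 1 := by
      have := length_splitDot k.toList; omega
    rw [scan_eq k.toList false]
    rw [hab]
    simp only [List.map_cons, List.map_nil, List.length_cons, List.length_nil]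
    rw [if_true, show ((0 + 1 + 1 : Nat) : Int) = (2 : Int) from by norm_num,
      show PySem.List.pyRange 0 (2 : Int) 1 = [(0 : Int), 1] from by decide]
    simp only [List.all_cons, List.all_nil, Bool.and_true]
    rw [show PySem.List.pyGetD [String.ofList a, String.ofList b] 0 "" = String.ofList a from by
          simp [PySem.List.pyGetD, PySem.List.pyGet?, PySem.List.pyIdx?],
        show PySem.List.pyGetD [String.ofList a, String.ofList b] 1 "" = String.ofList b from by
          simp [PySem.List.pyGetD, PySem.List.pyGet?, PySem.List.pyIdx?]]
    rw [ifAllInts_eq, ifAllInts_eq]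
    have hall := all_splitDot k.toList
    rw [hab] at hall
    simp only [List.all_cons, List.all_nil, Bool.and_true] at hall
    simp [hcount, ← hall]
  · -- zero or ≥ 2 dots: A falls through to ifAllInts(str(spl)) = False; B's count check fails
    have hcount : k.toList.count '.' ≠ 1 := by
      have := length_splitDot k.toList
      simp only [List.length_map] at h2
      omega
    rw [scan_eq k.toList false]
    simp only [h2, if_neg, not_false_iff]
    rw [ifAllInts_eq, pvStrOfStrList]
    simp [bracket_not_digit, hcount]
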